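-- pv_equiv track=rewrite | github.com/coandco/advent2018 | advent2018_day21.py | binary_pp
-- ===== SOURCE A (Python) =====
-- def binary_pp(number, ):
--     byte_array = []
--     while number > 0:
--         low_byte = number & 255
--         byte_array.append(low_byte)
--         number = number >> 8
--     if not byte_array:
--         byte_array = [0]
--     return "0b%s" % " ".join(["{0:08b}".format(x) for x in reversed(byte_array)])
-- ===== SOURCE B (Python) =====
-- def binary_pp(number, ):
--     if number <= 0:
--         return "0b00000000"
--     nbits = ((number.bit_length() + 7) // 8) * 8
--     s = format(number, "b").zfill(nbits)
--     return "0b" + " ".join(s[i:i + 8] for i in range(0, len(s), 8))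
-- ===== Notes on version B (the rewrite author's own statement) =====
-- stated objective: simpler
-- what changed: Replaces the byte-extraction loop (mask/shift per byte, then per-byte formatting) with one whole-number binary format zero-padded to a byte multiple that is then sliced into byte-sized chunks; non-positive input handled by a single guard.
import Mathlib
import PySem

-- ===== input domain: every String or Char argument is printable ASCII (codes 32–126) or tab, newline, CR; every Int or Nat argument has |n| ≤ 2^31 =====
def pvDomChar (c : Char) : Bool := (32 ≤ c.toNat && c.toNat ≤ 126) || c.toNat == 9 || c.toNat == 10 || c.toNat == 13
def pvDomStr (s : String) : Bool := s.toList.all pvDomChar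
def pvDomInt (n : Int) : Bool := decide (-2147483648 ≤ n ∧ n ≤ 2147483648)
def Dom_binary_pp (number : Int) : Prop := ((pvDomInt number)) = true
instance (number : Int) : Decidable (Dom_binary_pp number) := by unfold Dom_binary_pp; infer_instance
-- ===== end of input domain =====

-- B formats the whole number as one zero-padded binary string and slices it into byte-sized
-- chunks, instead of A's mask/shift loop extracting bytes one at a time (objective: simpler).

-- ===== PORT A =====

-- exact port of Python's format(x, "b") for x ≥ 0 (both Pythons only format non-negative values)
def pvNatBin (n : Nat) : List Char :=
  if h : n = 0 then []
  else pvNatBin (n / 2) ++ [if n % 2 = 1 then '1' else '0']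
decreasing_by exact Nat.div_lt_self (Nat.pos_of_ne_zero h) one_lt_two

def pvToBin (x : Int) : List Char := if x = 0 then ['0'] else pvNatBin x.toNat

-- "{0:08b}".format(x): binary digits of x padded with '0' on the left to width 8
def pvFmt8 (x : Int) : List Char := PySem.Chars.zfill (pvToBin x) 8

-- the while loop: byte_array in append order (low byte first)
def pvBytes (n : Int) : List Int :=
  if h : n > 0 then (PySem.Int.band n 255) :: pvBytes (n >>> (8 : Nat)) else []
termination_by n.toNat
decreasing_by
  have h0 : (0:Int) ≤ n := le_of_lt h
  have h1 : n >>> (8 : Nat) = ((n.toNat / 256 : Nat) : Int) := by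
    conv_lhs => rw [← Int.toNat_of_nonneg h0]
    rw [← Int.natCast_shiftRight, Nat.shiftRight_eq_div_pow]
  rw [h1]
  omega

def binary_pp (number : Int) : String :=
  let byte_array := pvBytes number
  let byte_array := if byte_array = [] then ([0] : List Int) else byte_array
  String.ofList ("0b".toList ++ PySem.Chars.join " ".toList (byte_array.reverse.map pvFmt8))

-- ===== PORT B =====
def binary_pp_alt (number : Int) : String :=
  if number ≤ 0 then "0b00000000"
  else
    -- (number.bit_length() + 7) // 8 * 8 — Nat arithmetic, exact since number > 0 here
    let nbits : Nat := ((PySem.Int.bitLength number + 7) / 8) * 8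
    let s : List Char := PySem.Chars.zfill (pvToBin number) (nbits : Int)
    String.ofList ("0b".toList ++ PySem.Chars.join " ".toList
      ((PySem.List.pyRange 0 (s.length : Int) 8).map
        (fun i => PySem.List.slice s (some i) (some (i + 8)))))

-- ===== PRECONDITION & SPEC =====
def Spec_binary_pp (number : Int) (out : String) : Prop := out = binary_pp_alt number
instance (number : Int) (out : String) : Decidable (Spec_binary_pp number out) := by unfold Spec_binary_pp; infer_instance

-- ===== CLAIM (what is proved, stated in full; the proofs are below) =====
def Claim_equal_binary_pp : Prop := ∀ (number : Int), Dom_binary_pp number → Spec_binary_pp number (binary_pp number)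

-- ===== LEMMAS AND PROOFS =====

-- proof-only: the 0-padded low L bits of m, built bit by bit
def pvBits : Nat → Nat → List Char
  | 0, _ => []
  | L+1, m => pvBits L (m / 2) ++ [if m % 2 = 1 then '1' else '0']

theorem length_pvBits (L m : Nat) : (pvBits L m).length = L := by
  induction L generalizing m with
  | zero => rfl
  | succ L ih => simp [pvBits, ih]

theorem pvBits_zero (L : Nat) : pvBits L 0 = List.replicate L '0' := by
  induction L with
  | zero => rfl
  | succ L ih => simp [pvBits, ih, List.replicate_succ' (n := L)]

-- zfill on a digit string (no sign) is plain left padding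
theorem pvZfill_pad (cs : List Char) (w : Int)
    (h : ∀ c r, cs = c :: r → c ≠ '+' ∧ c ≠ '-') :
    PySem.Chars.zfill cs w = List.replicate (w.toNat - cs.length) '0' ++ cs := by
  unfold PySem.Chars.zfill
  split_ifs with hle
  · have : w.toNat - cs.length = 0 := by omega
    simp [this]
  · cases cs with
    | nil => simp
    | cons c r =>
      have := h c r rfl
      simp [this.1, this.2]

theorem pvNatBin_chars (m : Nat) : ∀ c ∈ pvNatBin m, c = '0' ∨ c = '1' := by
  induction m using Nat.strong_induction_on with
  | _ m ih =>
    intro c hc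
    unfold pvNatBin at hc
    split_ifs at hc with h0 hbit
    · simp at hc
    all_goals
      rw [List.mem_append] at hc
      rcases hc with hc | hc
      · exact ih (m / 2) (Nat.div_lt_self (Nat.pos_of_ne_zero h0) one_lt_two) c hc
      · rw [List.mem_singleton] at hc
        simp [hc]

theorem pvNatBin_len (m : Nat) : ∀ L, m < 2 ^ L → (pvNatBin m).length ≤ L := by
  induction m using Nat.strong_induction_on with
  | _ m ih =>
    intro L hL
    unfold pvNatBin
    split_ifs with h0 hbit
    · simp
    all_goals
      have hLpos : 0 < L := by
        by_contra h
        have : L = 0 := by omega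
        subst this; simp at hL; omega
      have hlt : m / 2 < 2 ^ (L - 1) := by
        have : 2 ^ L = 2 * 2 ^ (L - 1) := by
          conv_lhs => rw [show L = (L - 1) + 1 by omega]
          ring
        omega
      have := ih (m / 2) (Nat.div_lt_self (Nat.pos_of_ne_zero h0) one_lt_two) (L - 1) hlt
      rw [List.length_append, List.length_singleton]
      omega

theorem pvZfill_natBin (L : Nat) : ∀ m, m < 2 ^ L →
    PySem.Chars.zfill (pvNatBin m) (L : Int) = pvBits L m := by
  induction L with
  | zero =>
    intro m hm
    have : m = 0 := by omega
    subst this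
    simp [pvNatBin, pvBits, pvZfill_pad]
  | succ L ih =>
    intro m hm
    by_cases h0 : m = 0
    · subst h0
      rw [pvNatBin, dif_pos rfl, pvBits_zero,
          pvZfill_pad [] _ (by intro c r hcr; simp at hcr)]
      simp
    · have hchars := pvNatBin_chars m
      conv_lhs => rw [pvNatBin]
      rw [dif_neg h0]
      have hd : ∀ c r, (pvNatBin (m / 2) ++ [if m % 2 = 1 then '1' else '0']) = c :: r →
          c ≠ '+' ∧ c ≠ '-' := by
        intro c r hcr
        have hc : c ∈ pvNatBin (m / 2) ++ [if m % 2 = 1 then '1' else '0'] := by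
          rw [hcr]; exact List.mem_cons_self
        simp at hc
        rcases hc with hc | hc
        · rcases pvNatBin_chars (m / 2) c hc with h | h <;> subst h <;> exact ⟨by decide, by decide⟩
        · split_ifs at hc <;> subst hc <;> exact ⟨by decide, by decide⟩
      have hm2 : m / 2 < 2 ^ L := by
        have : 2 ^ (L + 1) = 2 * 2 ^ L := by ring
        omega
      have hlen : (pvNatBin (m / 2)).length ≤ L := pvNatBin_len (m / 2) L hm2
      rw [pvZfill_pad _ _ hd, pvBits, ← ih (m / 2) hm2,
          pvZfill_pad _ _ (by
            intro c r hcr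
            have hc : c ∈ pvNatBin (m / 2) := by rw [hcr]; exact List.mem_cons_self
            rcases pvNatBin_chars (m / 2) c hc with h | h <;> subst h <;> exact ⟨by decide, by decide⟩)]
      push_cast
      simp

theorem pvZfill_toBin (L m : Nat) (hL : 0 < L) (hm : m < 2 ^ L) :
    PySem.Chars.zfill (pvToBin (m : Int)) (L : Int) = pvBits L m := by
  by_cases h0 : m = 0
  · subst h0
    rw [show ((0:Nat):Int) = 0 by rfl, pvToBin]
    rw [if_pos rfl,
        pvZfill_pad _ _ (by
          intro c r hcr
          simp at hcr
          rcases hcr with ⟨h1, h2⟩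
          exact ⟨by rw [← h1]; decide, by rw [← h1]; decide⟩),
        pvBits_zero]
    have hrep : List.replicate L '0' = List.replicate (L - 1) '0' ++ ['0'] := by
      conv_lhs => rw [show L = (L - 1) + 1 by omega]
      rw [List.replicate_succ']
    rw [hrep]
    simp
  · rw [pvToBin, if_neg (by exact_mod_cast h0)]
    rw [Int.toNat_natCast]
    exact pvZfill_natBin L m hm

theorem pvBits_add (K L m : Nat) :
    pvBits (L + K) m = pvBits L (m / 2 ^ K) ++ pvBits K (m % 2 ^ K) := by
  induction K generalizing m with
  | zero => simp [pvBits]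
  | succ K ih =>
    have e1 : L + (K + 1) = (L + K) + 1 := by omega
    rw [e1, pvBits, ih (m / 2)]
    have e2 : m / 2 / 2 ^ K = m / 2 ^ (K + 1) := by
      rw [Nat.div_div_eq_div_mul]
      congr 1
      rw [pow_succ']
    have e3 : (m % 2 ^ (K + 1)) / 2 = m / 2 % 2 ^ K := by
      rw [pow_succ']
      exact Nat.mod_mul_right_div_self m 2 (2 ^ K)
    have e4 : (m % 2 ^ (K + 1)) % 2 = m % 2 := by
      apply Nat.mod_mod_of_dvd
      exact dvd_pow_self 2 (by omega)
    rw [e2]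
    conv_rhs => rw [pvBits, e3, e4]
    simp

-- proof-only Nat mirror of the byte loop
def pvBytesN (m : Nat) : List Nat :=
  if h : m = 0 then [] else m % 256 :: pvBytesN (m / 256)
decreasing_by exact Nat.div_lt_self (Nat.pos_of_ne_zero h) (by norm_num)

theorem pvBytes_eq (m : Nat) : pvBytes (m : Int) = (pvBytesN m).map (fun b : Nat => (b : Int)) := by
  induction m using Nat.strong_induction_on with
  | _ m ih =>
    rw [pvBytes, pvBytesN]
    by_cases h0 : m = 0
    · subst h0; simp
    · rw [dif_pos (by exact_mod_cast Nat.pos_of_ne_zero h0), dif_neg h0]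
      have hband : PySem.Int.band (m : Int) 255 = ((m % 256 : Nat) : Int) := by
        rw [show (255 : Int) = ((255 : Nat) : Int) by norm_num, PySem.Int.band_natCast]
        congr 1
        have := Nat.and_two_pow_sub_one_eq_mod m 8
        norm_num at this
        omega
      have hshift : (m : Int) >>> (8 : Nat) = ((m / 256 : Nat) : Int) := by
        rw [← Int.natCast_shiftRight]
        congr 1
        rw [Nat.shiftRight_eq_div_pow]
      rw [hband, hshift, ih (m / 256) (Nat.div_lt_self (Nat.pos_of_ne_zero h0) (by norm_num))]
      simp

theorem pvBitLen_step (m : Nat) (h : 256 ≤ m) :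
    PySem.Int.bitLength (m : Int) = PySem.Int.bitLength ((m / 256 : Nat) : Int) + 8 := by
  rw [PySem.Int.bitLength_natCast (by omega : 0 < m),
      PySem.Int.bitLength_natCast (by omega : 0 < m / 2),
      PySem.Int.bitLength_natCast (by omega : 0 < m / 2 / 2),
      PySem.Int.bitLength_natCast (by omega : 0 < m / 2 / 2 / 2),
      PySem.Int.bitLength_natCast (by omega : 0 < m / 2 / 2 / 2 / 2),
      PySem.Int.bitLength_natCast (by omega : 0 < m / 2 / 2 / 2 / 2 / 2),
      PySem.Int.bitLength_natCast (by omega : 0 < m / 2 / 2 / 2 / 2 / 2 / 2),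
      PySem.Int.bitLength_natCast (by omega : 0 < m / 2 / 2 / 2 / 2 / 2 / 2 / 2)]
  have : m / 2 / 2 / 2 / 2 / 2 / 2 / 2 / 2 = m / 256 := by omega
  rw [this]

-- the number of bytes B formats
def pvNB (m : Nat) : Nat := (PySem.Int.bitLength (m : Int) + 7) / 8

theorem pvBitLen_le_of_lt : ∀ (m L : Nat), m < 2 ^ L → PySem.Int.bitLength (m : Int) ≤ L := by
  intro m L hm
  by_cases h0 : m = 0
  · subst h0; simp [PySem.Int.bitLength_zero]
  · have h1 := PySem.Int.two_pow_bitLength_le (m : Int) (by exact_mod_cast h0)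
    simp [Int.natAbs_natCast] at h1
    by_contra h
    have : L ≤ PySem.Int.bitLength (m : Int) - 1 := by omega
    have := Nat.pow_le_pow_right (show 1 ≤ 2 by omega) this
    omega

theorem pvBitLen_pos (m : Nat) (h : 0 < m) : 0 < PySem.Int.bitLength (m : Int) := by
  have h1 := PySem.Int.lt_two_pow_bitLength (m : Int)
  simp [Int.natAbs_natCast] at h1
  by_contra hc
  have : PySem.Int.bitLength (m : Int) = 0 := by omega
  rw [this] at h1
  simp at h1
  omega

-- proof-only: the chunk list B builds, nat-indexed
def pvChunks (s : List Char) (k : Nat) : List (List Char) :=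
  (List.range k).map (fun j =>
    PySem.List.slice s (some ((8 * j : Nat) : Int)) (some ((8 * j + 8 : Nat) : Int)))

theorem pvChunks_eq_port (s : List Char) (k : Nat) (h : s.length = 8 * k) :
    (PySem.List.pyRange 0 (s.length : Int) 8).map
      (fun i => PySem.List.slice s (some i) (some (i + 8))) = pvChunks s k := by
  rw [h, PySem.List.pyRange_of_pos 0 (8 * k : Nat) (by norm_num)]
  have hn : (if (0:Int) < ((8 * k : Nat) : Int)
      then ((((8 * k : Nat) : Int) - 0 + 8 - 1) / 8).toNat else 0) = k := by
    split_ifs with hk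
    · omega
    · omega
  rw [hn, pvChunks, List.map_map]
  apply List.map_congr_left
  intro j hj
  simp only [Function.comp]
  congr 1
  · congr 1; push_cast; ring
  · congr 1; push_cast; ring

theorem pvChunk_snoc (t u : List Char) (k : Nat) (ht : t.length = 8 * k) (hu : u.length = 8) :
    pvChunks (t ++ u) (k + 1) = pvChunks t k ++ [u] := by
  unfold pvChunks
  rw [List.range_succ, List.map_append]
  congr 1
  · apply List.map_congr_left
    intro j hj
    have hj' : j < k := List.mem_range.mp hj
    rw [PySem.List.slice_natCast, PySem.List.slice_natCast]
    have e : 8 * j + 8 - 8 * j = 8 := by omega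
    rw [e, List.drop_append_of_le_length (by omega),
        List.take_append_of_le_length (by simp; omega)]
  · simp only [List.map_cons, List.map_nil]
    congr 1
    rw [PySem.List.slice_natCast]
    have e : 8 * k + 8 - 8 * k = 8 := by omega
    rw [e, ← ht, List.drop_left, List.take_of_length_le (by omega)]

theorem pvMain : ∀ m : Nat, 0 < m →
    (pvBytesN m).reverse.map (fun b : Nat => pvFmt8 (b : Int))
      = pvChunks (pvBits (8 * pvNB m) m) (pvNB m) := by
  intro m
  induction m using Nat.strong_induction_on with
  | _ m ih =>
    intro hm
    by_cases hsmall : m < 256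
    · have hb : pvBytesN m = [m % 256] := by
        rw [pvBytesN, dif_neg (by omega), pvBytesN, dif_pos (by omega)]
      have hm256 : m % 256 = m := Nat.mod_eq_of_lt hsmall
      have hNB : pvNB m = 1 := by
        unfold pvNB
        have h1 := pvBitLen_le_of_lt m 8 (by norm_num; omega)
        have h2 := pvBitLen_pos m hm
        omega
      rw [hb, hm256, hNB]
      have hfmt : pvFmt8 (m : Int) = pvBits 8 m := by
        unfold pvFmt8
        have := pvZfill_toBin 8 m (by norm_num) (by norm_num; omega)
        rw [show ((8:Nat):Int) = (8:Int) by norm_num] at this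
        exact this
      rw [show (8 * 1 : Nat) = 8 by norm_num]
      unfold pvChunks
      simp only [List.range_one, List.map_cons, List.map_nil, List.reverse_singleton]
      rw [hfmt]
      rw [show ((8 * 0 : Nat) : Int) = ((0 : Nat) : Int) by norm_num,
          show ((8 * 0 + 8 : Nat) : Int) = ((8 : Nat) : Int) by norm_num,
          PySem.List.slice_natCast]
      simp [List.take_of_length_le (le_of_eq (length_pvBits 8 m))]
    · have h256 : 256 ≤ m := by omega
      have hb : pvBytesN m = m % 256 :: pvBytesN (m / 256) := by
        rw [pvBytesN, dif_neg (by omega)]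
      have hq : 0 < m / 256 := by omega
      have hNB : pvNB m = pvNB (m / 256) + 1 := by
        unfold pvNB
        rw [pvBitLen_step m h256]
        omega
      set K := pvNB (m / 256) with hK
      have hKpos : 0 < K := by
        unfold pvNB at hK
        have := pvBitLen_pos (m / 256) hq
        omega
      have hmlt : m < 2 ^ (8 * (K + 1)) := by
        have hle := pvBitLen_le_of_lt
        have h1 : PySem.Int.bitLength (m : Int) ≤ 8 * (K + 1) := by
          rw [pvBitLen_step m h256]
          unfold pvNB at hK
          omega
        have h2 := PySem.Int.lt_two_pow_bitLength (m : Int)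
        simp [Int.natAbs_natCast] at h2
        calc m < 2 ^ PySem.Int.bitLength (m : Int) := h2
          _ ≤ 2 ^ (8 * (K + 1)) := Nat.pow_le_pow_right (by omega) h1
      have hqlt : m / 256 < 2 ^ (8 * K) := by
        have h2 := PySem.Int.lt_two_pow_bitLength ((m / 256 : Nat) : Int)
        simp at h2
        have h1 : PySem.Int.bitLength ((m / 256 : Nat) : Int) ≤ 8 * K := by
          unfold pvNB at hK
          omega
        calc m / 256 < 2 ^ PySem.Int.bitLength ((m / 256 : Nat) : Int) := h2
          _ ≤ 2 ^ (8 * K) := Nat.pow_le_pow_right (by omega) h1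
      have hsplit : pvBits (8 * (K + 1)) m = pvBits (8 * K) (m / 256) ++ pvBits 8 (m % 256) := by
        have e : 8 * (K + 1) = 8 * K + 8 := by ring
        rw [e, pvBits_add 8 (8 * K) m]
        norm_num
      rw [hb, hNB, hsplit]
      simp only [List.reverse_cons, List.map_append, List.map_cons, List.map_nil]
      rw [pvChunk_snoc _ _ K (length_pvBits _ _) (length_pvBits _ _)]
      congr 1
      · exact ih (m / 256) (by omega) hq
      · congr 1
        unfold pvFmt8
        have := pvZfill_toBin 8 (m % 256) (by norm_num) (by norm_num; omega)
        rw [show ((8:Nat):Int) = (8:Int) by norm_num] at this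
        exact this

theorem pvBytesN_ne_nil (m : Nat) (h : 0 < m) : pvBytesN m ≠ [] := by
  rw [pvBytesN, dif_neg (by omega)]
  simp

-- ===== VERDICT (by name: the statement is the Claim_ definition above) =====
theorem binary_pp_spec : Claim_equal_binary_pp := by
  intro number _
  unfold Spec_binary_pp binary_pp binary_pp_alt
  by_cases hpos : number ≤ 0
  · have hb : pvBytes number = [] := by rw [pvBytes, dif_neg (by omega)]
    rw [if_pos hpos]
    simp only [hb]
    decide
  · rw [if_neg hpos]
    have h0 : 0 < number := by omega
    set m : Nat := number.toNat with hm
    have hmn : number = (m : Int) := by omega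
    have hmpos : 0 < m := by omega
    -- A side
    have hbytes : pvBytes number = (pvBytesN m).map (fun b : Nat => (b : Int)) := by
      rw [hmn]; exact pvBytes_eq m
    have hne : (pvBytesN m).map (fun b : Nat => (b : Int)) ≠ [] := by
      intro hcon
      exact pvBytesN_ne_nil m hmpos (List.map_eq_nil_iff.mp hcon)
    rw [hbytes]
    simp only [if_neg hne]
    -- B side
    have hnbits : ((PySem.Int.bitLength ((m : Nat) : Int) + 7) / 8) * 8 = 8 * pvNB m := by
      unfold pvNB; ring
    have hblle : PySem.Int.bitLength (m : Int) ≤ 8 * pvNB m := by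
      unfold pvNB; omega
    have hmlt : m < 2 ^ (8 * pvNB m) := by
      have h2 := PySem.Int.lt_two_pow_bitLength (m : Int)
      simp [Int.natAbs_natCast] at h2
      calc m < 2 ^ PySem.Int.bitLength (m : Int) := h2
        _ ≤ 2 ^ (8 * pvNB m) := Nat.pow_le_pow_right (by omega) hblle
    have hNBpos : 0 < pvNB m := by
      unfold pvNB
      have := pvBitLen_pos m hmpos
      omega
    have hs : PySem.Chars.zfill (pvToBin number) ((((PySem.Int.bitLength number + 7) / 8) * 8 : Nat) : Int)
        = pvBits (8 * pvNB m) m := by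
      rw [hmn, hnbits]
      exact pvZfill_toBin (8 * pvNB m) m (by omega) hmlt
    rw [hs]
    rw [pvChunks_eq_port _ (pvNB m) (length_pvBits _ _)]
    -- combine
    congr 2
    rw [← pvMain m hmpos]
    simp [Function.comp_def]
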